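-- pv_equiv track=rewrite | github.com/bruno02b26/LangLearn | langlearn/file_handlers/file_processing.py | create_line_dict_from_occurrences
-- ===== SOURCE A (Python) =====
-- def create_line_dict_from_occurrences(occurrences):
--     """
--     Creates a dictionary mapping file names to lists of unique line numbers from occurrences.
--
--     Args:
--         occurrences (dict): Dictionary with words as keys and lists of file-line tuples as values.
--
--     Returns:
--         dict: A dictionary with file names as keys and sorted lists of line numbers as values.
--     """
--     line_dict = {}
--
--     for word, files in occurrences.items():
--         for file_name, line_num in files:
--             if file_name not in line_dict:
--                 line_dict[file_name] = []
--             if line_num not in line_dict[file_name]: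
--                 line_dict[file_name].append(line_num)
--
--     for file_name in line_dict:
--         line_dict[file_name].sort()
--
--     return line_dict
-- ===== SOURCE B (Python) =====
-- def create_line_dict_from_occurrences(occurrences):
--     pairs = [p for files in occurrences.values() for p in files]
--     files = dict.fromkeys(f for f, _ in pairs)
--     return {f: sorted({ln for g, ln in pairs if g == f}) for f in files}
-- ===== Notes on version B (the rewrite author's own statement) =====
-- stated objective: alternative
-- what changed: A incrementally builds a dict during traversal with an inline 'if line_num not in' dedup branch and then sorts each list in place; B instead flattens everything into one pair list, takes the distinct file names in first-occurrence order with dict.fromkeys, and computes each file's value independently by a group-by-filter over the flat list, sorted({ln for g, ln in pairs if g == f}).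
import Mathlib
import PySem

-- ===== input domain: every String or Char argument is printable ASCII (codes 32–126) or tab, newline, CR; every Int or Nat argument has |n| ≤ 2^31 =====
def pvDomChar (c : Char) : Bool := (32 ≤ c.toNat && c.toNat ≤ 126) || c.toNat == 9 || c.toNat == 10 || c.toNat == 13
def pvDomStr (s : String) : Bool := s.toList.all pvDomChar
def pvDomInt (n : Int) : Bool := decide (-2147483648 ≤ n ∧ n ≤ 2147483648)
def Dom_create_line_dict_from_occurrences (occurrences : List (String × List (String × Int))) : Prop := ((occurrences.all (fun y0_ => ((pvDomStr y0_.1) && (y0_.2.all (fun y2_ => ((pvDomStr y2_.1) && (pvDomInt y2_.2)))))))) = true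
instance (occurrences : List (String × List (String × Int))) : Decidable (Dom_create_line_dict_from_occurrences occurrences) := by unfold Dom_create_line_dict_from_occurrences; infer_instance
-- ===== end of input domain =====

-- B replaces A's incremental dict building (inline dedup branch plus a final in-place
-- sort pass) by a group-by over one flattened pair list: distinct files in
-- first-occurrence order, each value computed independently as sorted({… if g == f}).

-- ===== PORT A =====
-- the body of A's inner loop: create the entry if missing, then append line_num if not yet present
def pvStepA (d : PySem.Dict String (List Int)) (fl : String × Int) : PySem.Dict String (List Int) :=
  let d1 := if d.contains fl.1 then d else d.insert fl.1 []
  if (d1.getD fl.1 []).contains fl.2 then d1 else d1.insert fl.1 ((d1.getD fl.1 []) ++ [fl.2])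

def create_line_dict_from_occurrences (occurrences : List (String × List (String × Int))) : List (String × List Int) :=
  let line_dict : PySem.Dict String (List Int) :=
    occurrences.foldl (fun d wf => wf.2.foldl pvStepA d) PySem.Dict.empty
  -- for file_name in line_dict: line_dict[file_name].sort()
  (line_dict.keys.foldl (fun d k => d.modify k [] (fun v => PySem.List.sorted v (fun x => x) false)) line_dict).items

-- ===== PORT B =====
def create_line_dict_from_occurrences_alt (occurrences : List (String × List (String × Int))) : List (String × List Int) :=
  -- pairs = [p for files in occurrences.values() for p in files]
  let pairs := occurrences.flatMap (fun wf => wf.2)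
  -- files = dict.fromkeys(f for f, _ in pairs)
  let files := PySem.List.dedup (pairs.map (fun p => p.1))
  -- {f: sorted({ln for g, ln in pairs if g == f}) for f in files}
  files.map (fun f =>
    (f, PySem.List.sorted (PySem.Set.ofList ((pairs.filter (fun p => p.1 == f)).map (fun p => p.2))) (fun x => x) false))

-- ===== PRECONDITION & SPEC =====
def Spec_create_line_dict_from_occurrences (occurrences : List (String × List (String × Int))) (out : List (String × List Int)) : Prop := out = create_line_dict_from_occurrences_alt occurrences
instance (occurrences : List (String × List (String × Int))) (out : List (String × List Int)) : Decidable (Spec_create_line_dict_from_occurrences occurrences out) := by unfold Spec_create_line_dict_from_occurrences; infer_instance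

-- ===== CLAIM (what is proved, stated in full; the proofs are below) =====
def Claim_equal_create_line_dict_from_occurrences : Prop := ∀ (occurrences : List (String × List (String × Int))), Dom_create_line_dict_from_occurrences occurrences → Spec_create_line_dict_from_occurrences occurrences (create_line_dict_from_occurrences occurrences)

-- ===== LEMMAS AND PROOFS =====

-- the value A's first loop holds for file f after processing the pair list l
def pvVal (l : List (String × Int)) (f : String) : List Int :=
  PySem.Set.ofList ((l.filter (fun p => p.1 == f)).map (fun p => p.2))

-- characterisation of A's dict after its first (nested) loop over the pair list l
def pvG (l : List (String × Int)) : List (String × List Int) :=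
  (PySem.Set.ofList (l.map (fun p => p.1))).map (fun f => (f, pvVal l f))

theorem pv_flatten (occ : List (String × List (String × Int)))
    (d0 : PySem.Dict String (List Int)) :
    occ.foldl (fun d wf => wf.2.foldl pvStepA d) d0
      = (occ.flatMap (fun wf => wf.2)).foldl pvStepA d0 := by
  induction occ generalizing d0 with
  | nil => rfl
  | cons wf occ ih => simp [List.flatMap_cons, List.foldl_append, ih]

theorem pv_find_map_nodup (F : List String) (V : String → List Int)
    (hn : F.Nodup) (k : String) (hk : k ∈ F) :
    List.find? (fun q => q.1 == k) (F.map (fun f => (f, V f))) = some (k, V k) := by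
  induction F with
  | nil => cases hk
  | cons a F ih =>
    simp only [List.nodup_cons] at hn
    rcases List.mem_cons.mp hk with h | h
    · subst h; simp
    · have hne : ¬ (a == k) := by
        intro hb; exact hn.1 (by rw [beq_iff_eq] at hb; rw [hb]; exact h)
      simp only [List.map_cons, List.find?, hne]
      simp at *
      exact ih hn.2 h

theorem pv_find_unique (l : List (String × List Int)) (hn : (l.map Prod.fst).Nodup)
    (p : String × List Int) (hp : p ∈ l) : List.find? (fun q => q.1 == p.1) l = some p := by
  induction l with
  | nil => cases hp
  | cons a l ih =>
    simp only [List.map_cons, List.nodup_cons] at hn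
    rcases List.mem_cons.mp hp with h | h
    · subst h; simp [List.find?]
    · have hne : ¬ (a.1 == p.1) := by
        intro hb
        exact hn.1 (by rw [beq_iff_eq] at hb; rw [hb]; exact List.mem_map_of_mem h)
      simp only [List.find?, hne]
      simp at *
      exact ih hn.2 h

theorem pv_ofList_append (xs : List String) (x : String) :
    PySem.Set.ofList (xs ++ [x]) = PySem.Set.add (PySem.Set.ofList xs) x := by
  simp [PySem.Set.ofList, List.foldl_append]

theorem pvVal_append_self (l : List (String × Int)) (p : String × Int) :
    pvVal (l ++ [p]) p.1 = PySem.Set.add (pvVal l p.1) p.2 := by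
  simp [pvVal, List.filter_append, PySem.Set.ofList, List.foldl_append]

theorem pvVal_append_ne (l : List (String × Int)) (p : String × Int) (f : String)
    (h : f ≠ p.1) : pvVal (l ++ [p]) f = pvVal l f := by
  simp [pvVal, List.filter_append, Ne.symm h]

theorem pv_groupA (l : List (String × Int)) :
    l.foldl pvStepA (PySem.Dict.empty : PySem.Dict String (List Int))
      = PySem.Dict.mk (pvG l) := by
  induction l using List.reverseRecOn with
  | nil => rfl
  | append_singleton l p ih =>
    rw [List.foldl_append, List.foldl_cons, List.foldl_nil, ih]
    apply PySem.Dict.ext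
    show (pvStepA (PySem.Dict.mk (pvG l)) p).items = pvG (l ++ [p])
    have hnF : (PySem.Set.ofList (l.map (fun q => q.1))).Nodup := by
      rw [← PySem.List.dedup_eq_ofList]; exact PySem.List.nodup_dedup _
    by_cases hb : p.1 ∈ l.map (fun q => q.1)
    · -- file already present
      have hmemF : p.1 ∈ PySem.Set.ofList (l.map (fun q => q.1)) :=
        (PySem.Set.mem_ofList ..).mpr hb
      have hcont : (PySem.Dict.mk (pvG l)).contains p.1 = true :=
        List.any_eq_true.mpr ⟨(p.1, pvVal l p.1), List.mem_map_of_mem hmemF, by simp⟩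
      have hfind : List.find? (fun q => q.1 == p.1) (pvG l) = some (p.1, pvVal l p.1) :=
        pv_find_map_nodup _ _ hnF p.1 hmemF
      have hgetD : (PySem.Dict.mk (pvG l)).getD p.1 [] = pvVal l p.1 := by
        simp [PySem.Dict.getD, PySem.Dict.get?, hfind]
      have hF' : PySem.Set.ofList ((l ++ [p]).map (fun q => q.1))
          = PySem.Set.ofList (l.map (fun q => q.1)) := by
        rw [List.map_append, show (([p]).map (fun q => q.1)) = [p.1] from rfl, pv_ofList_append]
        simp [PySem.Set.add, hmemF]
      by_cases hm : p.2 ∈ pvVal l p.1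
      · -- line already recorded: A's dict is unchanged
        have hA : pvStepA (PySem.Dict.mk (pvG l)) p = PySem.Dict.mk (pvG l) := by
          simp [pvStepA, hcont, hgetD, hm]
        rw [hA]
        show pvG l = pvG (l ++ [p])
        unfold pvG
        rw [hF']
        apply List.map_congr_left
        intro f hf
        by_cases hk : f = p.1
        · subst hk
          rw [pvVal_append_self]
          simp [PySem.Set.add, hm]
        · rw [pvVal_append_ne _ _ _ hk]
      · -- new line for an existing file: A appends it to that file's entry
        have hA : pvStepA (PySem.Dict.mk (pvG l)) p
            = (PySem.Dict.mk (pvG l)).insert p.1 (pvVal l p.1 ++ [p.2]) := by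
          simp [pvStepA, hcont, hgetD, hm]
        rw [hA, PySem.Dict.items_insert_of_contains _ _ hcont]
        show (pvG l).map _ = pvG (l ++ [p])
        unfold pvG
        rw [hF', List.map_map]
        apply List.map_congr_left
        intro f hf
        by_cases hk : f = p.1
        · subst hk
          rw [pvVal_append_self]
          simp [PySem.Set.add, hm]
        · rw [pvVal_append_ne _ _ _ hk]
          simp [hk]
    · -- new file: both sides append a fresh entry
      have hkeysne : ∀ q ∈ pvG l, ¬ (q.1 == p.1) := by
        intro q hq hbq
        obtain ⟨f, hf, rfl⟩ := List.mem_map.mp hq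
        rw [beq_iff_eq] at hbq
        exact hb (hbq ▸ (PySem.Set.mem_ofList ..).mp hf)
      have hcont : (PySem.Dict.mk (pvG l)).contains p.1 = false := by
        rw [← Bool.not_eq_true]
        intro h
        obtain ⟨q, hq, hbq⟩ := List.any_eq_true.mp h
        exact hkeysne q hq hbq
      have hfind : List.find? (fun q => q.1 == p.1) (pvG l) = none := by
        rw [List.find?_eq_none]
        intro q hq hbq
        exact hkeysne q hq hbq
      have hd1 : ((PySem.Dict.mk (pvG l)).insert p.1 []).items
          = pvG l ++ [(p.1, ([] : List Int))] :=
        PySem.Dict.items_insert_of_not_contains _ _ hcont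
      have hg1 : ((PySem.Dict.mk (pvG l)).insert p.1 []).getD p.1 [] = ([] : List Int) := by
        have h2 : ((PySem.Dict.mk (pvG l)).insert p.1 []) = PySem.Dict.mk (pvG l ++ [(p.1, [])]) :=
          PySem.Dict.ext hd1
        rw [h2]
        simp [PySem.Dict.getD, PySem.Dict.get?, List.find?_append, hfind]
      have hc1 : ((PySem.Dict.mk (pvG l)).insert p.1 []).contains p.1 = true := by
        have h2 : ((PySem.Dict.mk (pvG l)).insert p.1 []) = PySem.Dict.mk (pvG l ++ [(p.1, [])]) :=
          PySem.Dict.ext hd1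
        rw [h2]
        exact List.any_eq_true.mpr ⟨(p.1, []), by simp, by simp⟩
      have hA : (pvStepA (PySem.Dict.mk (pvG l)) p).items
          = (pvG l ++ [(p.1, ([] : List Int))]).map
              (fun q => if q.1 == p.1 then (p.1, [p.2]) else q) := by
        have h1 : pvStepA (PySem.Dict.mk (pvG l)) p
            = ((PySem.Dict.mk (pvG l)).insert p.1 []).insert p.1 ([] ++ [p.2]) := by
          simp [pvStepA, hcont, hg1]
        rw [h1, PySem.Dict.items_insert_of_contains _ _ hc1, hd1]
        simp
      rw [hA, List.map_append]
      have hself : ([(p.1, ([] : List Int))].map (fun q => if q.1 == p.1 then (p.1, [p.2]) else q))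
          = [(p.1, [p.2])] := by simp
      rw [hself]
      have hrest : (pvG l).map (fun q => if q.1 == p.1 then (p.1, [p.2]) else q) = pvG l := by
        conv_rhs => rw [show pvG l = (pvG l).map id from (List.map_id _).symm]
        apply List.map_congr_left
        intro q hq
        simp [hkeysne q hq]
      rw [hrest]
      unfold pvG
      have hF' : PySem.Set.ofList ((l ++ [p]).map (fun q => q.1))
          = PySem.Set.ofList (l.map (fun q => q.1)) ++ [p.1] := by
        have hnm : p.1 ∉ PySem.Set.ofList (l.map (fun q => q.1)) := by
          intro h; exact hb ((PySem.Set.mem_ofList ..).mp h)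
        rw [List.map_append, show (([p]).map (fun q => q.1)) = [p.1] from rfl, pv_ofList_append]
        simp [PySem.Set.add, hnm]
      rw [hF', List.map_append]
      congr 1
      · apply List.map_congr_left
        intro f hf
        have hne : f ≠ p.1 := by
          intro h; exact hb (h ▸ (PySem.Set.mem_ofList ..).mp hf)
        rw [pvVal_append_ne _ _ _ hne]
      · have hfilter : l.filter (fun q => q.1 == p.1) = [] := by
          rw [List.filter_eq_nil_iff]
          intro q hq hbq
          rw [beq_iff_eq] at hbq
          exact hb (hbq ▸ List.mem_map_of_mem hq)
        simp [pvVal, List.filter_append, hfilter, PySem.Set.ofList, PySem.Set.add]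

theorem pv_sortfold (ks : List String) :
    ∀ (d : PySem.Dict String (List Int)), (d.items.map Prod.fst).Nodup → ks.Nodup →
    (∀ k ∈ ks, k ∈ d.items.map Prod.fst) →
    (ks.foldl (fun d k => d.modify k [] (fun v => PySem.List.sorted v (fun x => x) false)) d).items
      = d.items.map (fun p => if p.1 ∈ ks then (p.1, PySem.List.sorted p.2 (fun x => x) false) else p) := by
  induction ks with
  | nil =>
    intro d _ _ _
    simp
  | cons k ks ih =>
    intro d hn hks hsub
    have hkmem : k ∈ d.items.map Prod.fst := hsub k (List.mem_cons_self ..)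
    obtain ⟨p0, hp0mem, hp0key⟩ := List.mem_map.mp hkmem
    have hck : d.contains k = true :=
      List.any_eq_true.mpr ⟨p0, hp0mem, by simp [hp0key]⟩
    have hfind : List.find? (fun q => q.1 == k) d.items = some p0 := by
      rw [← hp0key]; exact pv_find_unique d.items hn p0 hp0mem
    have hd1 : (d.modify k [] (fun v => PySem.List.sorted v (fun x => x) false)).items
        = d.items.map (fun p => if p.1 = k then (p.1, PySem.List.sorted p.2 (fun x => x) false) else p) := by
      simp only [PySem.Dict.modify, PySem.Dict.insert, hck, if_pos, PySem.Dict.getD,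
        PySem.Dict.get?, hfind]
      apply List.map_congr_left
      intro p hp
      by_cases hk : p.1 == k
      · have hpk : p.1 = k := by simpa using hk
        have : p = p0 := by
          have h1 := pv_find_unique d.items hn p hp
          rw [hpk, hfind] at h1
          exact (Option.some_inj.mp h1).symm
        subst this
        simp [hpk]
      · simp [hk, show ¬ p.1 = k from by simpa using hk]
    have hkeys1 : (d.modify k [] (fun v => PySem.List.sorted v (fun x => x) false)).items.map Prod.fst
        = d.items.map Prod.fst := by
      rw [hd1, List.map_map]
      apply List.map_congr_left
      intro p _
      by_cases hk : p.1 = k <;> simp [hk]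
    have hks' : ks.Nodup := (List.nodup_cons.mp hks).2
    have hknot : k ∉ ks := (List.nodup_cons.mp hks).1
    rw [List.foldl_cons, ih _ (hkeys1 ▸ hn) hks' (fun k' hk' => hkeys1 ▸ hsub k' (List.mem_cons_of_mem _ hk')), hd1, List.map_map]
    apply List.map_congr_left
    intro p _
    by_cases hk : p.1 = k
    · simp [Function.comp_apply, hk, hknot, List.mem_cons]
    · by_cases hm : p.1 ∈ ks <;> simp [Function.comp_apply, hk, hm, List.mem_cons]

-- ===== VERDICT (by name: the statement is the Claim_ definition above) =====
theorem create_line_dict_from_occurrences_spec : Claim_equal_create_line_dict_from_occurrences := by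
  intro occurrences _
  unfold Spec_create_line_dict_from_occurrences
  unfold create_line_dict_from_occurrences create_line_dict_from_occurrences_alt
  dsimp only
  rw [pv_flatten, pv_groupA]
  set l := occurrences.flatMap (fun wf => wf.2) with hl
  have hkeys : (PySem.Dict.mk (pvG l)).keys = PySem.Set.ofList (l.map (fun p => p.1)) := by
    show (pvG l).map Prod.fst = _
    rw [pvG, List.map_map]
    have h1 : List.map (Prod.fst ∘ fun f => (f, pvVal l f)) (PySem.Set.ofList (l.map (fun p => p.1)))
        = List.map id (PySem.Set.ofList (l.map (fun p => p.1))) :=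
      List.map_congr_left (fun f _ => rfl)
    rw [h1, List.map_id]
  have hitemsfst : (PySem.Dict.mk (pvG l)).items.map Prod.fst
      = PySem.Set.ofList (l.map (fun p => p.1)) := hkeys
  have hnF : (PySem.Set.ofList (l.map (fun p => p.1))).Nodup := by
    rw [← PySem.List.dedup_eq_ofList]; exact PySem.List.nodup_dedup _
  rw [hkeys, pv_sortfold _ _ (hitemsfst ▸ hnF) hnF (fun k hk => hitemsfst ▸ hk)]
  show (pvG l).map _ = (PySem.List.dedup (l.map (fun p => p.1))).map _
  rw [PySem.List.dedup_eq_ofList]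
  unfold pvG
  rw [List.map_map]
  apply List.map_congr_left
  intro f hf
  simp only [Function.comp_apply]
  rw [if_pos hf]
  rfl
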